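-- pv_equiv track=rewrite | github.com/BitR13x/Binary-Analysis | analyzers/anti_debug_detector.py | _detect_api_obfuscation
-- ===== SOURCE A (Python) =====
-- from typing import Dict, List, Any
--
-- def _detect_api_obfuscation(strings: List[str]) -> Dict[str, List[str]]:
--     """Detect API obfuscation and dynamic loading"""
--     obfuscation_indicators = {
--         'dynamic_loading': ['LoadLibrary', 'GetProcAddress', 'dlopen', 'dlsym'],
--         'string_obfuscation': ['decode', 'decrypt', 'deobfuscate', 'unpack'],
--         'api_hashing': ['hash', 'crc32', 'djb2', 'fnv'],
--         'indirect_calls': ['call', 'jmp', 'invoke', 'dispatch']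
--     }
--
--     detected_obfuscation = {}
--     combined_strings = ' '.join(strings).lower()
--
--     for category, indicators in obfuscation_indicators.items():
--         matches = [ind for ind in indicators if ind.lower() in combined_strings]
--         if matches:
--             detected_obfuscation[category] = matches
--
--     return detected_obfuscation
-- ===== SOURCE B (Python) =====
-- from typing import Dict, List
--
-- def _detect_api_obfuscation(strings: List[str]) -> Dict[str, List[str]]:
--     """Detect API obfuscation and dynamic loading (per-string scan + found-set index)"""
--     obfuscation_indicators = {
--         'dynamic_loading': ['LoadLibrary', 'GetProcAddress', 'dlopen', 'dlsym'],
--         'string_obfuscation': ['decode', 'decrypt', 'deobfuscate', 'unpack'],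
--         'api_hashing': ['hash', 'crc32', 'djb2', 'fnv'],
--         'indirect_calls': ['call', 'jmp', 'invoke', 'dispatch']
--     }
--     all_indicators = [ind for inds in obfuscation_indicators.values() for ind in inds]
--
--     # No indicator contains a space, so an indicator occurs in ' '.join(strings)
--     # iff it occurs inside one of the strings: scan string by string, index hits.
--     found = set()
--     for s in strings:
--         sl = s.lower()
--         for ind in all_indicators:
--             if ind.lower() in sl:
--                 found.add(ind)
--
--     detected_obfuscation = {}
--     for category, indicators in obfuscation_indicators.items():
--         matches = [ind for ind in indicators if ind in found]
--         if matches: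
--             detected_obfuscation[category] = matches
--     return detected_obfuscation
-- ===== Notes on version B (the rewrite author's own statement) =====
-- stated objective: alternative
-- what changed: Instead of lowercasing the space-joined blob and testing each indicator against it per category, B scans the strings one by one, builds a set of all indicators found in any single string (valid because no indicator contains a space), and then filters each category by membership in that found-set.
import Mathlib
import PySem

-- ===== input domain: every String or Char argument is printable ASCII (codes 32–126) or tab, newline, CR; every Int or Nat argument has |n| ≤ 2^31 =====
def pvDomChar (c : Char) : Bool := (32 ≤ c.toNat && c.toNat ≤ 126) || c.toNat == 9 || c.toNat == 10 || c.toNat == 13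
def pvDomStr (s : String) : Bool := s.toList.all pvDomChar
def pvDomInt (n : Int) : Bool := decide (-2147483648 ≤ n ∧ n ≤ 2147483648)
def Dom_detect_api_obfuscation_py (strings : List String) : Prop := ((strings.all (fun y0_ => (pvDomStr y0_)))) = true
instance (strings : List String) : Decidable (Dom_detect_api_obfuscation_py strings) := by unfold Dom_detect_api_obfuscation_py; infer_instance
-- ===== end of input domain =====

-- B replaces A's search over the lowered space-joined blob by a per-string scan that
-- indexes every indicator found in some string into a set, then filters the categories
-- by that set (alternative decomposition; same asymptotic cost).


-- ===== PORT A =====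
-- the literal obfuscation_indicators dict (insertion order; keys distinct, so the
-- dict writes of A are appends to the association list)
def pvObfTable : List (String × List String) :=
  [("dynamic_loading", ["LoadLibrary", "GetProcAddress", "dlopen", "dlsym"]),
   ("string_obfuscation", ["decode", "decrypt", "deobfuscate", "unpack"]),
   ("api_hashing", ["hash", "crc32", "djb2", "fnv"]),
   ("indirect_calls", ["call", "jmp", "invoke", "dispatch"])]

def detect_api_obfuscation_py (strings : List String) : List (String × List String) :=
  let combined := PySem.Str.lower (PySem.Str.join " " strings)
  pvObfTable.foldl (fun acc ci =>
    let ms := ci.2.filter (fun ind => PySem.Str.isIn (PySem.Str.lower ind) combined)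
    if ms.isEmpty then acc else acc ++ [(ci.1, ms)]) []

-- ===== PORT B =====
def pvAllIndicators : List String := pvObfTable.flatMap (fun ci => ci.2)

def detect_api_obfuscation_py_alt (strings : List String) : List (String × List String) :=
  let found := strings.foldl (fun fs s =>
      pvAllIndicators.foldl (fun fs ind =>
        if PySem.Str.isIn (PySem.Str.lower ind) (PySem.Str.lower s) then fs.add ind else fs) fs)
    (PySem.Set.ofList ([] : List String))
  pvObfTable.foldl (fun acc ci =>
    let ms := ci.2.filter (fun ind => found.contains ind)
    if ms.isEmpty then acc else acc ++ [(ci.1, ms)]) []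

-- ===== PRECONDITION & SPEC =====
def Spec_detect_api_obfuscation_py (strings : List String) (out : List (String × List String)) : Prop := out = detect_api_obfuscation_py_alt strings
instance (strings : List String) (out : List (String × List String)) : Decidable (Spec_detect_api_obfuscation_py strings out) := by unfold Spec_detect_api_obfuscation_py; infer_instance

-- ===== CLAIM (what is proved, stated in full; the proofs are below) =====
def Claim_equal_detect_api_obfuscation_py : Prop := ∀ (strings : List String), Dom_detect_api_obfuscation_py strings → Spec_detect_api_obfuscation_py strings (detect_api_obfuscation_py strings)

-- ===== LEMMAS AND PROOFS =====

-- A pattern without spaces is an infix of `a ++ ' ' :: b` iff it is an infix of a or of b.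
theorem infix_space_split (p a b : List Char) (hsp : ' ' ∉ p) :
    p <:+: a ++ ' ' :: b ↔ p <:+: a ∨ p <:+: b := by
  constructor
  · rintro ⟨s, t, h⟩
    have hlen : s.length + p.length + t.length = a.length + 1 + b.length := by
      have := congrArg List.length h
      simp at this
      omega
    rcases le_or_gt (s.length + p.length) a.length with hle | hgt
    · left
      have hpre : s ++ p <+: a := by
        apply List.prefix_of_prefix_length_le (l₃ := a ++ ' ' :: b)
        · exact ⟨t, by simpa using h⟩
        · exact List.prefix_append a _
        · simpa using hle
      exact ((List.suffix_append s p).isInfix).trans hpre.isInfix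
    · rcases le_or_gt (a.length + 1) s.length with hge | hlt
      · right
        have hsuf : p ++ t <:+ b := by
          apply List.suffix_of_suffix_length_le (l₃ := a ++ ' ' :: b)
          · exact ⟨s, by simpa using h⟩
          · exact ⟨a ++ [' '], by simp⟩
          · simp
            omega
        exact ((List.prefix_append p t).isInfix).trans hsuf.isInfix
      · exfalso
        have hslen : s.length ≤ a.length := by omega
        have h' : s ++ (p ++ t) = a ++ ' ' :: b := by simpa [List.append_assoc] using h
        have e1 : (a ++ ' ' :: b)[a.length]? = some ' ' := by
          rw [List.getElem?_append_right (Nat.le_refl _)]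
          simp
        have e2 : (a ++ ' ' :: b)[a.length]? = p[a.length - s.length]? := by
          rw [← h', List.getElem?_append_right hslen, List.getElem?_append_left (by omega)]
        exact hsp (List.mem_of_getElem? (e2.symm.trans e1))
  · rintro (h | h)
    · exact h.trans (List.prefix_append a _).isInfix
    · have hs : b <:+ a ++ ' ' :: b := ⟨a ++ [' '], by simp⟩
      exact h.trans hs.isInfix

-- lowercasing commutes with the space-join
theorem lower_join (L : List (List Char)) :
    PySem.Chars.lower (PySem.Chars.join [' '] L) = PySem.Chars.join [' '] (L.map PySem.Chars.lower) := by
  induction L with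
  | nil => rfl
  | cons x rest ih =>
    cases rest with
    | nil => simp [PySem.Chars.join_singleton]
    | cons y rest' =>
      have hc : PySem.Chars.lowerChar ' ' = ' ' := by decide
      simp only [List.map_cons] at ih ⊢
      rw [PySem.Chars.join_cons_cons, PySem.Chars.join_cons_cons, ← ih]
      simp [PySem.Chars.lower, hc]

-- a space-free nonempty pattern occurs in the space-join iff it occurs in one piece
theorem infix_join_iff (p : List Char) (L : List (List Char)) (hsp : ' ' ∉ p) (hne : p ≠ []) :
    p <:+: PySem.Chars.join [' '] L ↔ ∃ l ∈ L, p <:+: l := by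
  induction L with
  | nil =>
    simp [PySem.Chars.join]
    intro h
    exact hne (List.eq_nil_of_infix_nil h)
  | cons x rest ih =>
    cases rest with
    | nil => simp [PySem.Chars.join_singleton]
    | cons y rest' =>
      rw [PySem.Chars.join_cons_cons,
        show x ++ [' '] ++ PySem.Chars.join [' '] (y :: rest') = x ++ ' ' :: PySem.Chars.join [' '] (y :: rest') by simp,
        infix_space_split p x _ hsp, ih]
      simp

-- membership in the conditional-add fold over the candidate list
theorem mem_foldl_add_if (L : List String) (fs : PySem.Set String) (p : String → Bool) (ind : String) :
    (ind ∈ L.foldl (fun fs i => if p i then fs.add i else fs) fs)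
      ↔ ind ∈ fs ∨ (ind ∈ L ∧ p ind = true) := by
  induction L generalizing fs with
  | nil => simp
  | cons x rest ih =>
    rw [List.foldl_cons, ih]
    by_cases hp : p x
    · simp only [hp, if_pos, PySem.Set.mem_add, List.mem_cons]
      by_cases hx : ind = x
      · subst hx; simp [hp]
      · simp [hx]
    · simp only [hp, List.mem_cons, Bool.false_eq_true]
      by_cases hx : ind = x
      · subst hx; simp [hp]
      · simp [hx]

-- characterization of B's found-set
theorem mem_found (strings : List String) (fs : PySem.Set String) (ind : String) :
    (ind ∈ strings.foldl (fun fs s =>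
        pvAllIndicators.foldl (fun fs i =>
          if PySem.Str.isIn (PySem.Str.lower i) (PySem.Str.lower s) then fs.add i else fs) fs) fs)
      ↔ ind ∈ fs ∨ ∃ s ∈ strings, ind ∈ pvAllIndicators ∧
          PySem.Str.isIn (PySem.Str.lower ind) (PySem.Str.lower s) = true := by
  induction strings generalizing fs with
  | nil => simp
  | cons x rest ih =>
    rw [List.foldl_cons, ih, mem_foldl_add_if]
    simp only [List.mem_cons]
    constructor
    · rintro ((h | ⟨h1, h2⟩) | ⟨s, hs, h1, h2⟩)
      · exact Or.inl h
      · exact Or.inr ⟨x, Or.inl rfl, h1, h2⟩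
      · exact Or.inr ⟨s, Or.inr hs, h1, h2⟩
    · rintro (h | ⟨s, (rfl | hs), h1, h2⟩)
      · exact Or.inl (Or.inl h)
      · exact Or.inl (Or.inr ⟨h1, h2⟩)
      · exact Or.inr ⟨s, hs, h1, h2⟩

-- each concrete indicator lowers to a nonempty, space-free pattern
theorem indicator_facts : ∀ ind ∈ pvAllIndicators,
    ' ' ∉ (PySem.Str.lower ind).toList ∧ (PySem.Str.lower ind).toList ≠ [] := by decide

-- the two membership tests agree for every indicator of the table
theorem pred_eq (strings : List String) (ind : String) (hmem : ind ∈ pvAllIndicators) :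
    PySem.Str.isIn (PySem.Str.lower ind) (PySem.Str.lower (PySem.Str.join " " strings))
      = ((strings.foldl (fun fs s =>
          pvAllIndicators.foldl (fun fs i =>
            if PySem.Str.isIn (PySem.Str.lower i) (PySem.Str.lower s) then fs.add i else fs) fs)
          (PySem.Set.ofList ([] : List String))).contains ind) := by
  obtain ⟨hsp, hne⟩ := indicator_facts ind hmem
  simp only [PySem.Str.toList_lower] at hsp hne
  rw [Bool.eq_iff_iff, PySem.Set.contains_iff, mem_found]
  rw [PySem.Str.isIn_iff_infix]
  simp only [PySem.Str.toList_lower, PySem.Str.toList_join]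
  rw [show (" " : String).toList = [' '] from rfl, lower_join,
    infix_join_iff _ _ hsp hne]
  constructor
  · rintro ⟨l, hl, hinf⟩
    rw [List.map_map, List.mem_map] at hl
    obtain ⟨s, hs, rfl⟩ := hl
    refine Or.inr ⟨s, hs, hmem, ?_⟩
    rw [PySem.Str.isIn_iff_infix]
    simp only [PySem.Str.toList_lower]
    exact hinf
  · rintro (h | ⟨s, hs, -, hin⟩)
    · exact absurd h (by simp [PySem.Set.ofList])
    · rw [PySem.Str.isIn_iff_infix] at hin
      simp only [PySem.Str.toList_lower] at hin
      exact ⟨PySem.Chars.lower s.toList, by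
        rw [List.map_map, List.mem_map]; exact ⟨s, hs, rfl⟩, hin⟩

-- ===== VERDICT (by name: the statement is the Claim_ definition above) =====
theorem detect_api_obfuscation_py_spec : Claim_equal_detect_api_obfuscation_py := by
  intro strings _
  unfold Spec_detect_api_obfuscation_py detect_api_obfuscation_py detect_api_obfuscation_py_alt
  apply PySem.List.foldl_congr_mem
  intro acc ci hci
  have hfilter : ci.2.filter (fun ind =>
      PySem.Str.isIn (PySem.Str.lower ind) (PySem.Str.lower (PySem.Str.join " " strings)))
    = ci.2.filter (fun ind =>
      ((strings.foldl (fun fs s =>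
          pvAllIndicators.foldl (fun fs i =>
            if PySem.Str.isIn (PySem.Str.lower i) (PySem.Str.lower s) then fs.add i else fs) fs)
          (PySem.Set.ofList ([] : List String))).contains ind)) := by
    apply List.filter_congr
    intro ind hind
    exact pred_eq strings ind (List.mem_flatMap_of_mem hci hind)
  simp only [hfilter]
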